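/- GENERATED by farm/mkstatement.py from design/units.split.tsv — do not edit.
   THE SPLIT of the proof unit `start_decoder.C4` into `start_decoder.C4a`, `start_decoder.C4b`, `start_decoder.C4c`, `start_decoder.C4d`: the children's statements give the parent's
   UNCHANGED statement (so nothing above the parent — callers, compositions — is touched by the split). -/
import Vorbis.Spec.StartDecoderC4
import Vorbis.Spec.Units.start_decoder_C4
import Vorbis.Spec.Units.start_decoder_C4a
import Vorbis.Spec.Units.start_decoder_C4b
import Vorbis.Spec.Units.start_decoder_C4c
import Vorbis.Spec.Units.start_decoder_C4d
namespace Vorbis.Spec.Splits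
open X86 X86.User Asan

/-- The children of the split unit `start_decoder.C4` prove it, by `Vorbis.Spec.StartDecoder.SegC4.of_parts`. -/
theorem start_decoder_C4
    (h_start_decoder_C4a : Vorbis.Spec.start_decoder_C4a.Statement)
    (h_start_decoder_C4b : Vorbis.Spec.start_decoder_C4b.Statement)
    (h_start_decoder_C4c : Vorbis.Spec.start_decoder_C4c.Statement)
    (h_start_decoder_C4d : Vorbis.Spec.start_decoder_C4d.Statement) :
    Vorbis.Spec.start_decoder_C4.Statement := by
  intro Lay _hLay μ _hμ u₀ _hcode _h_get_bits _h_asan_store1_noabort _h_asan_load4_noabort _h_asan_load1_noabort _h_error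
  apply Vorbis.Spec.StartDecoder.SegC4.of_parts
  · exact h_start_decoder_C4a Lay _hLay μ _hμ u₀ _hcode _h_get_bits _h_asan_load4_noabort _h_asan_load1_noabort
  · exact h_start_decoder_C4b Lay _hLay μ _hμ u₀ _hcode _h_get_bits _h_asan_store1_noabort
  · exact h_start_decoder_C4c Lay _hLay μ _hμ u₀ _hcode _h_asan_store1_noabort _h_error
  · exact h_start_decoder_C4d Lay _hLay μ _hμ u₀ _hcode

end Vorbis.Spec.Splits
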